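-- pv_equiv track=rewrite | github.com/pypi-data/pypi-mirror-163 | packages/UnicodeTokenizer/UnicodeTokenizer-0.0.8-py3-none-any.whl/UnicodeTokenizer.py | split_category
-- ===== SOURCE A (Python) =====
-- import unicodedata
--
-- def split_category(line):
--     # if len(line) <= 1:
--     # return line
--     l = ''
--     cat0 = cat = ''
--     for x in line:
--         cat = unicodedata.category(x)[0]
--         if cat in 'CZ':
--             x = ' '
--         elif cat in 'P':
--             x = ' '+x+' '
--         elif cat in 'LN' and cat0 != cat:
--             x = ' '+x
--         cat0 = cat
--         l += x
--     return l
-- ===== SOURCE B (Python) =====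
-- import unicodedata
-- from itertools import groupby
--
-- def split_category(line):
--     # Idiomatic: segment into maximal same-category runs with groupby, render each run.
--     pieces = []
--     for key, grp in groupby(line, key=lambda x: unicodedata.category(x)[0]):
--         run = ''.join(grp)
--         if key in 'CZ':
--             pieces.append(' ' * len(run))
--         elif key == 'P':
--             pieces.append(''.join(' ' + x + ' ' for x in run))
--         elif key in 'LN':
--             pieces.append(' ' + run)
--         else:
--             pieces.append(run)
--     return ''.join(pieces)
-- ===== Notes on version B (the rewrite author's own statement) =====
-- stated objective: idiomatic
-- what changed: Replaces A's stateful char-by-char loop (running cat0 variable, string +=) with itertools.groupby segmentation into maximal same-category runs, rendering each run as a whole and joining the pieces.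
import Mathlib
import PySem

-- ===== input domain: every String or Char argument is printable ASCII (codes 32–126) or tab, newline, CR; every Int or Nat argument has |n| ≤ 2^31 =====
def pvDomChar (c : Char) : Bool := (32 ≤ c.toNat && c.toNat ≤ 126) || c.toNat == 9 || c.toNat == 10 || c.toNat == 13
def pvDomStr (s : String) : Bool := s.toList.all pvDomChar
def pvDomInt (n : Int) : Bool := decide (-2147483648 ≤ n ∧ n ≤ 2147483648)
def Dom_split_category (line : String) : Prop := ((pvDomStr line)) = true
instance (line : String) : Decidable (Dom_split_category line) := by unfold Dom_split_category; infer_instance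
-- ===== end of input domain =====

-- B is the same task written idiomatically: groupby-style maximal same-category runs, each run rendered as a whole.

-- unicodedata.category(x)[0], shared by both ports; exact on the ASCII domain (printable + tab/newline/CR),
-- arbitrary ('S') outside it where nothing is claimed.
def ucCat0 (x : Char) : Char :=
  if x = ' ' then 'Z'
  else if x = '\t' ∨ x = '\n' ∨ x = '\r' then 'C'
  else if '0' ≤ x ∧ x ≤ '9' then 'N'
  else if ('a' ≤ x ∧ x ≤ 'z') ∨ ('A' ≤ x ∧ x ≤ 'Z') then 'L'
  else if x ∈ "!\"#%&'()*,-./:;?@[\\]_{}".toList then 'P'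
  else 'S'

-- ===== PORT A =====
-- A's if/elif chain on one character: cat0 = none plays Python's initial cat0 = ''.
def pieceA (cat0 : Option Char) (x : Char) : List Char :=
  if ucCat0 x = 'C' ∨ ucCat0 x = 'Z' then [' ']
  else if ucCat0 x = 'P' then [' ', x, ' ']
  else if (ucCat0 x = 'L' ∨ ucCat0 x = 'N') ∧ cat0 ≠ some (ucCat0 x) then [' ', x]
  else [x]

-- one iteration of A's loop body: update cat0, append the chosen piece
def stepA (st : Option Char × List Char) (x : Char) : Option Char × List Char :=
  (some (ucCat0 x), st.2 ++ pieceA st.1 x)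

def split_category (line : String) : String :=
  String.mk (line.toList.foldl stepA (none, [])).2

-- ===== PORT B =====
-- groupby: peel the maximal prefix whose chars share category k
def takeRun (k : Char) : List Char → List Char × List Char
  | [] => ([], [])
  | x :: xs =>
    if ucCat0 x = k then
      let p := takeRun k xs
      (x :: p.1, p.2)
    else ([], x :: xs)

theorem takeRun_snd_length (k : Char) (xs : List Char) : (takeRun k xs).2.length ≤ xs.length := by
  induction xs with
  | nil => simp [takeRun]
  | cons x xs ih =>
    simp only [takeRun]
    split
    · exact Nat.le_succ_of_le ih
    · simp

def runs : List Char → List (List Char)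
  | [] => []
  | x :: xs =>
    let p := takeRun (ucCat0 x) xs
    (x :: p.1) :: runs p.2
termination_by l => l.length
decreasing_by exact Nat.lt_succ_of_le (takeRun_snd_length _ _)

-- render one maximal run according to its key (category of its first char)
def render : List Char → List Char
  | [] => []
  | x :: r =>
    if ucCat0 x = 'C' ∨ ucCat0 x = 'Z' then (x :: r).map (fun _ => ' ')
    else if ucCat0 x = 'P' then (x :: r).flatMap (fun y => [' ', y, ' '])
    else if ucCat0 x = 'L' ∨ ucCat0 x = 'N' then ' ' :: x :: r
    else x :: r

def split_category_alt (line : String) : String :=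
  String.mk ((runs line.toList).map render).flatten

-- ===== PRECONDITION & SPEC =====
def Spec_split_category (line : String) (out : String) : Prop := out = split_category_alt line
instance (line : String) (out : String) : Decidable (Spec_split_category line out) := by unfold Spec_split_category; infer_instance

-- ===== CLAIM (what is proved, stated in full; the proofs are below) =====
def Claim_equal_split_category : Prop := ∀ (line : String), Dom_split_category line → Spec_split_category line (split_category line)

-- ===== LEMMAS AND PROOFS =====

-- what A appends to the accumulator over the rest of the line, given the running cat0
def pieces (cat0 : Option Char) : List Char → List Char
  | [] => []
  | x :: xs => pieceA cat0 x ++ pieces (some (ucCat0 x)) xs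

-- pieceA for a char whose category equals the running cat0 (the LN branch never fires)
def pieceS (k : Char) (y : Char) : List Char :=
  if k = 'C' ∨ k = 'Z' then [' ']
  else if k = 'P' then [' ', y, ' ']
  else [y]

theorem foldA_eq (l : List Char) : ∀ (c0 : Option Char) (acc : List Char),
    (l.foldl stepA (c0, acc)).2 = acc ++ pieces c0 l := by
  induction l with
  | nil => intro c0 acc; simp [pieces]
  | cons x xs ih =>
    intro c0 acc
    simp only [List.foldl_cons, stepA, pieces]
    rw [ih]
    simp

theorem pieceA_same (k x : Char) (hx : ucCat0 x = k) : pieceA (some k) x = pieceS k x := by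
  simp only [pieceA, pieceS, hx]
  split_ifs with h1 h2 h3 <;> simp_all

theorem pieces_run (k : Char) (xs : List Char) :
    pieces (some k) xs = (takeRun k xs).1.flatMap (pieceS k) ++ pieces (some k) (takeRun k xs).2 := by
  induction xs with
  | nil => simp [takeRun, pieces]
  | cons x xs ih =>
    simp only [takeRun]
    split
    · rename_i h
      simp only [pieces, List.flatMap_cons, List.append_assoc]
      rw [h, pieceA_same k x h, ih]
    · simp [pieces]

theorem takeRun_rest_head (k : Char) (xs : List Char) :
    ∀ h, (takeRun k xs).2.head? = some h → ucCat0 h ≠ k := by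
  induction xs with
  | nil => simp [takeRun]
  | cons x xs ih =>
    simp only [takeRun]
    split
    · exact ih
    · rename_i hne
      intro h hh
      simp only [List.head?_cons, Option.some.injEq] at hh
      subst hh; exact hne

theorem flatMap_one {α β : Type} (f : α → β) (l : List α) :
    l.flatMap (fun y => [f y]) = l.map f := by
  induction l with
  | nil => rfl
  | cons x xs ih => simp [List.flatMap_cons, ih]

theorem render_run (c0 : Option Char) (x : Char) (r : List Char)
    (hc : c0 ≠ some (ucCat0 x)) :
    render (x :: r) = pieceA c0 x ++ r.flatMap (pieceS (ucCat0 x)) := by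
  by_cases h1 : ucCat0 x = 'C' ∨ ucCat0 x = 'Z'
  · -- C/Z: each char becomes a space
    simp only [render, pieceA, if_pos h1]
    rw [show pieceS (ucCat0 x) = fun y => [(fun _ => ' ') y] by
      funext y; simp only [pieceS, if_pos h1]]
    rw [flatMap_one]
    simp
  · by_cases h2 : ucCat0 x = 'P'
    · -- P: each char becomes ' y '
      simp only [render, pieceA, if_neg h1, if_pos h2]
      rw [show pieceS (ucCat0 x) = fun y => [' ', y, ' '] by
        funext y; simp only [pieceS, if_neg h1, if_pos h2]]
      simp
    · have hS : pieceS (ucCat0 x) = fun y => [(fun y => y) y] := by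
        funext y; simp only [pieceS, if_neg h1, if_neg h2]
      by_cases h3 : ucCat0 x = 'L' ∨ ucCat0 x = 'N'
      · -- L/N run start
        simp only [render, pieceA, if_neg h1, if_neg h2, if_pos h3, if_pos (And.intro h3 hc)]
        rw [hS, flatMap_one]
        simp
      · -- other categories (S): unchanged
        have h4 : ¬((ucCat0 x = 'L' ∨ ucCat0 x = 'N') ∧ c0 ≠ some (ucCat0 x)) :=
          fun hp => h3 hp.1
        simp only [render, pieceA, if_neg h1, if_neg h2, if_neg h3, if_neg h4]
        rw [hS, flatMap_one]
        simp

theorem runs_render (n : ℕ) : ∀ (l : List Char), l.length ≤ n → ∀ (c0 : Option Char),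
    (∀ h, l.head? = some h → c0 ≠ some (ucCat0 h)) →
    ((runs l).map render).flatten = pieces c0 l := by
  induction n with
  | zero =>
    intro l hl c0 _
    interval_cases hh : l.length
    · rw [List.length_eq_zero_iff.mp hh]; simp [runs, pieces]
  | succ n ih =>
    intro l hl c0 hc
    match l with
    | [] => simp [runs, pieces]
    | x :: xs =>
      rw [runs]
      simp only [List.map_cons, List.flatten_cons]
      rw [render_run c0 x (takeRun (ucCat0 x) xs).1 (hc x rfl)]
      rw [ih (takeRun (ucCat0 x) xs).2
        (le_trans (takeRun_snd_length _ _) (Nat.succ_le_succ_iff.mp hl))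
        (some (ucCat0 x))
        (by intro h hh hEq
            exact takeRun_rest_head (ucCat0 x) xs h hh (Option.some.injEq _ _ ▸ hEq).symm)]
      rw [pieces, pieces_run (ucCat0 x) xs]
      simp

-- ===== VERDICT (by name: the statement is the Claim_ definition above) =====
theorem split_category_spec : Claim_equal_split_category := by
  intro line _
  unfold Spec_split_category split_category split_category_alt
  rw [foldA_eq, runs_render line.toList.length line.toList le_rfl none (by simp)]
  simp
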